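-- pv_equiv track=rewrite | github.com/ZhuoyuWei/tc3d | code/model_nn.py | elements_4
-- ===== SOURCE A (Python) =====
-- def elements_4(elements, nodes):
--     node2count = {}
--
--     for i, ele in enumerate(elements):
--         node2count[int(ele['node_id'])] = int(ele['element_id'])
--
--     counts = [0] * len(nodes)
--
--     for i, node in enumerate(nodes):
--         if int(node['node_id']) in node2count:
--             counts[i] = node2count.get(int(node['node_id']), 0)
--
--     return counts
-- ===== SOURCE B (Python) =====
-- def elements_4(elements, nodes):
--     counts = []
--     for node in nodes:
--         key = int(node['node_id'])
--         val = 0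
--         for ele in reversed(elements):
--             if int(ele['node_id']) == key:
--                 val = int(ele['element_id'])
--                 break
--         counts.append(val)
--     return counts
-- ===== Notes on version B (the rewrite author's own statement) =====
-- stated objective: alternative
-- what changed: Drops the prebuilt node2count dict and the preallocated counts list: one pass over nodes appends, per node, the element_id of the last matching element found by a reversed scan of elements (0 if none).
import Mathlib
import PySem

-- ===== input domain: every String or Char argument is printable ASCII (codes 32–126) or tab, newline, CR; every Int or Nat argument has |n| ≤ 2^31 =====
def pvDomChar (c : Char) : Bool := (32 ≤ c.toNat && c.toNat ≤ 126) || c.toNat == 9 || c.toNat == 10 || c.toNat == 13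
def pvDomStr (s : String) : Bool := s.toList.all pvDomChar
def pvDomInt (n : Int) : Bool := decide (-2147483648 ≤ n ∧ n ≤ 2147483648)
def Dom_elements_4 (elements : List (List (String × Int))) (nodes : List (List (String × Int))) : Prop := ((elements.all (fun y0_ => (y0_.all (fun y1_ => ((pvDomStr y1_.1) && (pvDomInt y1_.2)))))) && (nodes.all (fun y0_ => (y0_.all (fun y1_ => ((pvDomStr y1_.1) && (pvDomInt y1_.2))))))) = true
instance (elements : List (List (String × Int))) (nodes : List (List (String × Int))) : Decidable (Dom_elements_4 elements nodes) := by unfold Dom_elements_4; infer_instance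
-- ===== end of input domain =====

-- B replaces the prebuilt node2count dict by a per-node reversed scan of elements (alternative decomposition, same results).
-- Pre_ excludes inputs on which A raises KeyError: some element lacks key 'node_id'/'element_id', or some node lacks 'node_id'.


-- ===== PORT A =====
-- d['k']: first match in the association list (KeyError = none; under Pre_ the key is present,
-- so the .getD 0 default used to keep the ports total is never reached).
def pyKey (d : List (String × Int)) (k : String) : Option Int := (PySem.Dict.mk d).get? k

def elements_4 (elements : List (List (String × Int))) (nodes : List (List (String × Int))) : List Int :=
  let node2count : PySem.Dict Int Int :=
    (PySem.List.enumerate elements).foldl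
      (fun d p => d.insert ((pyKey p.2 "node_id").getD 0) ((pyKey p.2 "element_id").getD 0))
      PySem.Dict.empty
  let counts : List Int := List.replicate nodes.length 0
  (PySem.List.enumerate nodes).foldl
    (fun cs p =>
      if node2count.contains ((pyKey p.2 "node_id").getD 0)
      then cs.set p.1.toNat (node2count.getD ((pyKey p.2 "node_id").getD 0) 0)
      else cs)
    counts

-- ===== PORT B =====
def elements_4_alt (elements : List (List (String × Int))) (nodes : List (List (String × Int))) : List Int :=
  nodes.foldl
    (fun counts node =>
      let key := (pyKey node "node_id").getD 0
      let val :=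
        match elements.reverse.find? (fun ele => (pyKey ele "node_id").getD 0 == key) with
        | some ele => (pyKey ele "element_id").getD 0
        | none => 0
      counts ++ [val])
    []

-- ===== PRECONDITION & SPEC =====
-- Pre_ = exactly the inputs where A returns: every element dict has keys 'node_id' and 'element_id',
-- and every node dict has key 'node_id' (otherwise Python raises KeyError).
def Pre_elements_4 (elements : List (List (String × Int))) (nodes : List (List (String × Int))) : Prop :=
  (∀ e ∈ elements, (pyKey e "node_id").isSome ∧ (pyKey e "element_id").isSome) ∧
  (∀ n ∈ nodes, (pyKey n "node_id").isSome)
instance (elements : List (List (String × Int))) (nodes : List (List (String × Int))) : Decidable (Pre_elements_4 elements nodes) := by unfold Pre_elements_4; infer_instance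

def pvWitness_elements_4 : (List (List (String × Int))) × (List (List (String × Int))) :=
  ([[("node_id", 1), ("element_id", 7)], [("node_id", 1), ("element_id", 9)]],
   [[("node_id", 1)], [("node_id", 2)]])

def Spec_elements_4 (elements : List (List (String × Int))) (nodes : List (List (String × Int))) (out : List Int) : Prop := out = elements_4_alt elements nodes
instance (elements : List (List (String × Int))) (nodes : List (List (String × Int))) (out : List Int) : Decidable (Spec_elements_4 elements nodes out) := by unfold Spec_elements_4; infer_instance

-- ===== CLAIM (what is proved, stated in full; the proofs are below) =====
def Claim_equal_elements_4 : Prop := ∀ (elements : List (List (String × Int))) (nodes : List (List (String × Int))), Dom_elements_4 elements nodes → Pre_elements_4 elements nodes → Spec_elements_4 elements nodes (elements_4 elements nodes)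

-- ===== LEMMAS AND PROOFS =====

-- A's first loop ignores the enumerate index
theorem foldl_enumerate_snd {α β : Type} (l : List α) (g : β → α → β) (s : Int) (d : β) :
    (PySem.List.enumerate l s).foldl (fun d p => g d p.2) d = l.foldl g d := by
  induction l generalizing s d with
  | nil => simp [PySem.List.enumerate_nil]
  | cons a l ih => rw [PySem.List.enumerate_cons]; simp [ih]

-- the dict built by A's first loop answers lookups like a reversed scan
theorem get?_foldl_insert_key
    {α : Type} (l : List α) (k v : α → Int) (d : PySem.Dict Int Int) (x : Int) :
    (l.foldl (fun d a => d.insert (k a) (v a)) d).get? x =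
      match l.reverse.find? (fun a => k a == x) with
      | some a => some (v a)
      | none => d.get? x := by
  induction l generalizing d with
  | nil => simp
  | cons a l ih =>
      simp only [List.foldl_cons, List.reverse_cons, List.find?_append, ih]
      cases h : l.reverse.find? (fun a => k a == x) with
      | some b => simp
      | none =>
          simp only [Option.none_or, List.find?_cons, List.find?_nil]
          by_cases hk : k a = x
          · rw [show (k a == x) = true by simp [hk]]
            simp [hk, PySem.Dict.get?_insert_self]
          · rw [show (k a == x) = false by simp [hk]]
            apply PySem.Dict.get?_insert_of_ne
            exact fun h => hk (Eq.symm h)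

-- A's second loop: conditional in-place writes into a zero-filled list = a map
theorem enumerate_foldl_set {α : Type} (l : List α) (P : α → Bool) (f : α → Int)
    (s : Nat) (cs : List Int) (hlen : cs.length = s + l.length)
    (h0 : ∀ i, s ≤ i → (hi : i < cs.length) → cs[i] = 0) :
    (PySem.List.enumerate l (s : Int)).foldl
        (fun cs p => if P p.2 then cs.set p.1.toNat (f p.2) else cs) cs =
      cs.take s ++ l.map (fun a => if P a then f a else 0) := by
  induction l generalizing s cs with
  | nil =>
      rw [PySem.List.enumerate_nil, List.foldl_nil, List.map_nil, List.append_nil,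
          List.take_of_length_le (le_of_eq (by simpa using hlen))]
  | cons a l ih =>
      rw [PySem.List.enumerate_cons, List.foldl_cons]
      have hs : ((s : Int) + 1) = ((s + 1 : Nat) : Int) := by push_cast; ring
      have hslt : s < cs.length := by simp at hlen; omega
      by_cases hP : P a
      · simp only [hP, if_true, Int.toNat_natCast]
        rw [hs, ih (s + 1) _ (by simp at hlen ⊢; omega)
              (by intro i hi hlt
                  rw [List.getElem_set_ne (by omega)]
                  exact h0 i (by omega) (by simpa using hlt))]
        have h1 : (cs.set s (f a)).take (s + 1) = cs.take s ++ [f a] := by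
          rw [List.take_add_one, List.take_set,
              List.set_eq_of_length_le (by simp : (List.take s cs).length ≤ s)]
          simp [hslt]
        rw [h1]
        simp [hP]
      · have hP' : (if P a then cs.set ((s : Int)).toNat (f a) else cs) = cs := by
          simp [hP]
        rw [hP', hs, ih (s + 1) _ (by simp at hlen ⊢; omega)
              (fun i hi hlt => h0 i (by omega) hlt)]
        have h1 : cs.take (s + 1) = cs.take s ++ [(0 : Int)] := by
          rw [List.take_add_one]
          simp [hslt, h0 s le_rfl hslt]
        rw [h1]
        simp [hP]

-- B's loop: appending one value per node = a map
theorem foldl_append_singleton {α : Type} (l : List α) (g : α → Int) (acc : List Int) :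
    l.foldl (fun counts node => counts ++ [g node]) acc = acc ++ l.map g := by
  induction l generalizing acc with
  | nil => simp
  | cons a l ih => simp [ih]

theorem elements_4_spec : Claim_equal_elements_4 := by
  intro elements nodes _ _
  unfold Spec_elements_4
  show elements_4 elements nodes = elements_4_alt elements nodes
  unfold elements_4 elements_4_alt
  simp only [foldl_append_singleton, List.nil_append]
  rw [foldl_enumerate_snd elements
        (fun d ele => d.insert ((pyKey ele "node_id").getD 0) ((pyKey ele "element_id").getD 0))
        0 PySem.Dict.empty]
  have h := enumerate_foldl_set nodes
      (fun node => (elements.foldl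
          (fun d ele => d.insert ((pyKey ele "node_id").getD 0) ((pyKey ele "element_id").getD 0))
          PySem.Dict.empty).contains ((pyKey node "node_id").getD 0))
      (fun node => (elements.foldl
          (fun d ele => d.insert ((pyKey ele "node_id").getD 0) ((pyKey ele "element_id").getD 0))
          PySem.Dict.empty).getD ((pyKey node "node_id").getD 0) 0)
      0 (List.replicate nodes.length 0) (by simp) (by intro i _ hi; simp)
  rw [Nat.cast_zero] at h
  rw [h]
  simp only [List.take_zero, List.nil_append]
  apply List.map_congr_left
  intro node _
  rw [PySem.Dict.contains_eq_isSome_get?, PySem.Dict.getD_eq_get?_getD,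
      get?_foldl_insert_key elements (fun e => (pyKey e "node_id").getD 0)
        (fun e => (pyKey e "element_id").getD 0)]
  cases h : elements.reverse.find?
      (fun ele => (pyKey ele "node_id").getD 0 == (pyKey node "node_id").getD 0) with
  | some e => simp
  | none => simp [PySem.Dict.get?_empty]
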